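-- pv_equiv track=rewrite | github.com/jbouren/tetrisBot | tools/discovery/discover_addresses.py | cluster_changes
-- ===== SOURCE A (Python) =====
-- def cluster_changes(changes: dict, max_gap: int = 16):
--     """Group changed offsets into clusters (nearby changes likely belong
--     to the same data structure)."""
--     if not changes:
--         return []
--
--     offsets = sorted(changes.keys())
--     clusters = []
--     current_cluster = [offsets[0]]
--
--     for i in range(1, len(offsets)):
--         if offsets[i] - offsets[i-1] <= max_gap:
--             current_cluster.append(offsets[i])
--         else:
--             clusters.append(current_cluster)
--             current_cluster = [offsets[i]]
--     clusters.append(current_cluster)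
--
--     return clusters
-- ===== SOURCE B (Python) =====
-- def cluster_changes(changes: dict, max_gap: int = 16):
--     """Two-pointer over the sorted offsets: advance j to the end of each
--     maximal run of small gaps and slice that run out as one cluster."""
--     offsets = sorted(changes)
--     n = len(offsets)
--     clusters = []
--     i = 0
--     while i < n:
--         j = i + 1
--         while j < n and offsets[j] - offsets[j-1] <= max_gap:
--             j += 1
--         clusters.append(offsets[i:j])
--         i = j
--     return clusters
-- ===== Notes on version B (the rewrite author's own statement) =====
-- stated objective: alternative
-- what changed: A builds clusters with a flush-on-gap accumulator inside a single for-loop; B instead two-pointer scans the sorted offsets, advancing j to the end of each maximal small-gap run and slicing offsets[i:j] out as one cluster.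
import Mathlib
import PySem

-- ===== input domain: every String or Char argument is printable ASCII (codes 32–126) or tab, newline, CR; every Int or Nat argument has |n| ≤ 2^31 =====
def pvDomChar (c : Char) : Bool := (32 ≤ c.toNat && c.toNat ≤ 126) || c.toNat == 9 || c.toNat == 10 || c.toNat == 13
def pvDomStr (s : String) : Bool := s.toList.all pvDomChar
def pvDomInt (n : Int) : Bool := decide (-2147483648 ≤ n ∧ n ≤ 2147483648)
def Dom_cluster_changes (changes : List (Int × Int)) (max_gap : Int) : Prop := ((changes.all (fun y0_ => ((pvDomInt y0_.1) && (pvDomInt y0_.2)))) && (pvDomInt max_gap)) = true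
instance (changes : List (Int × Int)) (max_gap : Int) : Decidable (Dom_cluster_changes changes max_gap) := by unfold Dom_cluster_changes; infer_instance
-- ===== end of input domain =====

-- B replaces A's flush-on-gap accumulator loop by a two-pointer scan over the sorted
-- offsets that slices out each maximal small-gap run as one cluster (objective: alternative).

-- ===== PORT A =====
def cluster_changes (changes : List (Int × Int)) (max_gap : Int) : List (List Int) :=
  if (PySem.Dict.ofList changes).items.isEmpty then []
  else
    let offsets := PySem.List.sorted (PySem.Dict.ofList changes).keys (fun x => x) false
    let r := (PySem.List.pyRange 1 (PySem.List.len offsets) 1).foldl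
      (fun (st : List (List Int) × List Int) i =>
        if PySem.List.pyGetD offsets i 0 - PySem.List.pyGetD offsets (i-1) 0 ≤ max_gap
        then (st.1, st.2 ++ [PySem.List.pyGetD offsets i 0])
        else (st.1 ++ [st.2], [PySem.List.pyGetD offsets i 0]))
      ([], [PySem.List.pyGetD offsets 0 0])
    r.1 ++ [r.2]

-- ===== PORT B =====
-- inner `while j < n and offsets[j] - offsets[j-1] <= max_gap: j += 1`
def pvScan (max_gap : Int) (offsets : List Int) (n : Int) (j : Int) : Int :=
  if j < n ∧ PySem.List.pyGetD offsets j 0 - PySem.List.pyGetD offsets (j-1) 0 ≤ max_gap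
  then pvScan max_gap offsets n (j+1)
  else j
termination_by (n - j).toNat
decreasing_by omega

-- the port's outer loop cites this for termination
theorem pvScan_ge (max_gap : Int) (offsets : List Int) (n : Int) (j : Int) :
    j ≤ pvScan max_gap offsets n j := by
  fun_induction pvScan with
  | case1 j h ih => omega
  | case2 j h => omega

-- outer `while i < n: …`
def pvOuter (max_gap : Int) (offsets : List Int) (n : Int) (i : Int)
    (clusters : List (List Int)) : List (List Int) :=
  if i < n then
    pvOuter max_gap offsets n (pvScan max_gap offsets n (i+1))
      (clusters ++ [PySem.List.slice offsets (some i) (some (pvScan max_gap offsets n (i+1)))])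
  else clusters
termination_by (n - i).toNat
decreasing_by have := pvScan_ge max_gap offsets n (i+1); omega

def cluster_changes_alt (changes : List (Int × Int)) (max_gap : Int) : List (List Int) :=
  let offsets := PySem.List.sorted (PySem.Dict.ofList changes).keys (fun x => x) false
  pvOuter max_gap offsets (PySem.List.len offsets) 0 []

-- ===== PRECONDITION & SPEC =====
def Spec_cluster_changes (changes : List (Int × Int)) (max_gap : Int) (out : List (List Int)) : Prop := out = cluster_changes_alt changes max_gap
instance (changes : List (Int × Int)) (max_gap : Int) (out : List (List Int)) : Decidable (Spec_cluster_changes changes max_gap out) := by unfold Spec_cluster_changes; infer_instance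

-- ===== CLAIM (what is proved, stated in full; the proofs are below) =====
def Claim_equal_cluster_changes : Prop := ∀ (changes : List (Int × Int)) (max_gap : Int), Dom_cluster_changes changes max_gap → Spec_cluster_changes changes max_gap (cluster_changes changes max_gap)

-- ===== LEMMAS AND PROOFS =====

-- abstract chunker both ports are reduced to
def pvSplit (g p : Int) : List Int → List Int × List Int
  | [] => ([], [])
  | y :: ys =>
    if y - p ≤ g then
      let r := pvSplit g y ys
      (y :: r.1, r.2)
    else ([], y :: ys)

theorem pvSplit_append (g p : Int) (l : List Int) :
    (pvSplit g p l).1 ++ (pvSplit g p l).2 = l := by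
  induction l generalizing p with
  | nil => simp [pvSplit]
  | cons y ys ih => by_cases h : y - p ≤ g <;> simp [pvSplit, h, ih]

theorem pvSplit_len (g p : Int) (l : List Int) :
    (pvSplit g p l).2.length ≤ l.length := by
  have := congrArg List.length (pvSplit_append g p l)
  simp at this; omega

def pvChunks (g : Int) : List Int → List (List Int)
  | [] => []
  | x :: xs => (x :: (pvSplit g x xs).1) :: pvChunks g (pvSplit g x xs).2
termination_by l => l.length
decreasing_by have := pvSplit_len g x xs; simp; omega

theorem foldl_range_adj {σ : Type} (f : σ → Int → Int → σ) (l : List Int) (s : σ) :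
    (List.range (l.length - 1)).foldl (fun st k => f st (l.getD k 0) (l.getD (k+1) 0)) s
      = (l.zip l.tail).foldl (fun st p => f st p.1 p.2) s := by
  induction l generalizing s with
  | nil => simp
  | cons x xs ih =>
    cases xs with
    | nil => simp
    | cons y ys =>
      simp only [List.length_cons, Nat.add_sub_cancel, List.range_succ_eq_map,
        List.foldl_cons, List.foldl_map, List.getD_cons_zero, List.getD_cons_succ,
        List.zip_cons_cons, List.tail_cons]
      exact ih (f s x y)

theorem portA_pairs (g : Int) (xs : List Int) (x : Int) (cl : List (List Int)) (cur : List Int) :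
    (let r := ((x :: xs).zip xs).foldl
        (fun (st : List (List Int) × List Int) p =>
          if p.2 - p.1 ≤ g then (st.1, st.2 ++ [p.2]) else (st.1 ++ [st.2], [p.2]))
        (cl, cur ++ [x]);
      r.1 ++ [r.2])
      = cl ++ (match pvChunks g (x :: xs) with
               | [] => [cur]
               | h :: t => (cur ++ h) :: t) := by
  induction xs generalizing x cl cur with
  | nil => simp [pvChunks, pvSplit]
  | cons y ys ih =>
    by_cases h : y - x ≤ g
    · have key := ih y cl (cur ++ [x])
      simp only [List.zip_cons_cons, List.foldl_cons, h, if_pos, List.append_assoc] at key ⊢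
      rw [key]
      simp [pvChunks, pvSplit, h]
    · have key := ih y (cl ++ [cur ++ [x]]) []
      simp only [List.zip_cons_cons, List.foldl_cons, h, if_neg, not_false_iff,
        List.append_assoc, List.nil_append] at key ⊢
      rw [key]
      simp [pvChunks, pvSplit, h]

theorem pvScan_split (g : Int) (l : List Int) (xs : List Int) (p : Int) (i : Nat)
    (hd : l.drop i = p :: xs) :
    pvScan g l (l.length : Int) ((i : Int) + 1)
        = (i : Int) + 1 + ((pvSplit g p xs).1.length : Int)
      ∧ l.drop (i + 1 + (pvSplit g p xs).1.length) = (pvSplit g p xs).2 := by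
  induction xs generalizing p i with
  | nil =>
    have hlen : l.length = i + 1 := by
      have := congrArg List.length hd
      simp [List.length_drop] at this
      omega
    rw [pvScan]
    rw [if_neg (by omega)]
    refine ⟨by simp [pvSplit], ?_⟩
    simp [pvSplit]
    omega
  | cons y ys ih =>
    have hlen : l.length = i + ys.length + 2 := by
      have := congrArg List.length hd
      simp [List.length_drop] at this
      omega
    have hd' : l.drop (i + 1) = y :: ys := by
      rw [← List.tail_drop, hd, List.tail_cons]
    have hgp : PySem.List.pyGetD l ((i : Int) + 1) 0 = y := by
      have h1 : (i : Int) + 1 = ((i + 1 : Nat) : Int) := by push_cast; ring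
      rw [h1, PySem.List.pyGetD_natCast, List.getD_eq_getElem?_getD]
      have h2 : l[i + 1]? = some y := by
        have h0 := congrArg (fun t : List Int => t[0]?) hd'
        simpa [List.getElem?_drop] using h0
      simp [h2]
    have hgp' : PySem.List.pyGetD l ((i : Int) + 1 - 1) 0 = p := by
      have h1 : (i : Int) + 1 - 1 = ((i : Nat) : Int) := by ring
      rw [h1, PySem.List.pyGetD_natCast, List.getD_eq_getElem?_getD]
      have h2 : l[i]? = some p := by
        have h0 := congrArg (fun t : List Int => t[0]?) hd
        simpa [List.getElem?_drop] using h0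
      simp [h2]
    by_cases hle : y - p ≤ g
    · rw [pvScan, if_pos ⟨by omega, by rw [hgp, hgp']; exact hle⟩]
      have hih := ih y (i + 1) hd'
      have hc : ((i + 1 : Nat) : Int) + 1 = (i : Int) + 1 + 1 := by push_cast; ring
      rw [hc] at hih
      refine ⟨?_, ?_⟩
      · rw [hih.1]
        simp [pvSplit, hle]
        ring
      · have h2 := hih.2
        have heq : i + 1 + (pvSplit g p (y :: ys)).1.length
            = i + 1 + 1 + (pvSplit g y ys).1.length := by
          simp [pvSplit, hle]; omega
        rw [heq]
        rw [h2]
        simp [pvSplit, hle]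
    · rw [pvScan, if_neg (by rw [hgp, hgp']; intro hcon; exact hle hcon.2)]
      refine ⟨by simp [pvSplit, hle], ?_⟩
      simp [pvSplit, hle]
      exact hd'

theorem pvOuter_eq (g : Int) (l : List Int) (i : Nat) (acc : List (List Int))
    (hi : i ≤ l.length) :
    pvOuter g l (l.length : Int) (i : Int) acc = acc ++ pvChunks g (l.drop i) := by
  have H : ∀ (d : Nat) (i : Nat) (acc : List (List Int)), i ≤ l.length → l.length - i = d →
      pvOuter g l (l.length : Int) (i : Int) acc = acc ++ pvChunks g (l.drop i) := by
    intro d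
    induction d using Nat.strong_induction_on with
    | _ d ihd =>
      intro i acc hle hd
      by_cases hlt : i < l.length
      · obtain ⟨p, xs, hdrop⟩ : ∃ p xs, l.drop i = p :: xs := by
          cases hcd : l.drop i with
          | nil =>
            exfalso
            have := congrArg List.length hcd
            simp [List.length_drop] at this
            omega
          | cons a b => exact ⟨a, b, rfl⟩
        have hsp := pvScan_split g l xs p i hdrop
        have hlen2 : l.length = i + xs.length + 1 := by
          have := congrArg List.length hdrop
          simp [List.length_drop] at this
          omega
        have hm : (pvSplit g p xs).1.length ≤ xs.length := by
          have := congrArg List.length (pvSplit_append g p xs)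
          simp at this
          omega
        rw [pvOuter, if_pos (by exact_mod_cast hlt)]
        have hjc : pvScan g l (l.length : Int) ((i : Int) + 1)
            = ((i + 1 + (pvSplit g p xs).1.length : Nat) : Int) := by
          rw [hsp.1]; push_cast; ring
        rw [hjc]
        have hslice : PySem.List.slice l (some (i : Int))
            (some ((i + 1 + (pvSplit g p xs).1.length : Nat) : Int))
            = p :: (pvSplit g p xs).1 := by
          rw [PySem.List.slice_natCast, hdrop]
          have h1 : i + 1 + (pvSplit g p xs).1.length - i = (pvSplit g p xs).1.length + 1 := by
            omega
          rw [h1]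
          simp only [List.take_succ_cons]
          congr 1
          have htake : ∀ (mo ta : List Int), mo ++ ta = xs → List.take mo.length xs = mo := by
            intro mo ta h
            rw [← h]
            exact List.take_left' rfl
          exact htake _ _ (pvSplit_append g p xs)
        rw [hslice]
        rw [ihd (l.length - (i + 1 + (pvSplit g p xs).1.length)) (by omega)
          (i + 1 + (pvSplit g p xs).1.length) (acc ++ [p :: (pvSplit g p xs).1])
          (by omega) rfl]
        rw [hsp.2, hdrop, pvChunks]
        simp
      · have hi : i = l.length := by omega
        rw [pvOuter, if_neg (by exact_mod_cast hlt)]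
        subst hi
        simp [pvChunks]
  exact H (l.length - i) i acc hi rfl

theorem portA_core (g : Int) (x : Int) (xs : List Int) :
    (let l := x :: xs
     let r := (PySem.List.pyRange 1 (PySem.List.len l) 1).foldl
      (fun (st : List (List Int) × List Int) i =>
        if PySem.List.pyGetD l i 0 - PySem.List.pyGetD l (i-1) 0 ≤ g
        then (st.1, st.2 ++ [PySem.List.pyGetD l i 0])
        else (st.1 ++ [st.2], [PySem.List.pyGetD l i 0]))
      ([], [PySem.List.pyGetD l 0 0])
     r.1 ++ [r.2]) = pvChunks g (x :: xs) := by
  have hlen : ((PySem.List.len (x :: xs) : Int) - 1).toNat = (x :: xs).length - 1 := by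
    simp [PySem.List.len]
  simp only [PySem.List.pyRange_one, hlen]
  rw [List.foldl_map]
  have hbody : ∀ (st : List (List Int) × List Int) (k : Nat),
      (if PySem.List.pyGetD (x :: xs) (1 + (k : Int)) 0
            - PySem.List.pyGetD (x :: xs) (1 + (k : Int) - 1) 0 ≤ g
       then (st.1, st.2 ++ [PySem.List.pyGetD (x :: xs) (1 + (k : Int)) 0])
       else (st.1 ++ [st.2], [PySem.List.pyGetD (x :: xs) (1 + (k : Int)) 0]))
      = (if (x :: xs).getD (k + 1) 0 - (x :: xs).getD k 0 ≤ g
         then (st.1, st.2 ++ [(x :: xs).getD (k + 1) 0])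
         else (st.1 ++ [st.2], [(x :: xs).getD (k + 1) 0])) := by
    intro st k
    have h1 : (1 : Int) + (k : Int) = ((k + 1 : Nat) : Int) := by push_cast; ring
    have h2 : (1 : Int) + (k : Int) - 1 = ((k : Nat) : Int) := by ring
    rw [h2, h1, PySem.List.pyGetD_natCast, PySem.List.pyGetD_natCast]
  simp only [hbody]
  have h0 : PySem.List.pyGetD (x :: xs) 0 0 = x := by
    simp [PySem.List.pyGetD, PySem.List.pyGet?, PySem.List.pyIdx?]
  rw [h0]
  have hadj := foldl_range_adj
    (fun (st : List (List Int) × List Int) a b =>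
      if b - a ≤ g then (st.1, st.2 ++ [b]) else (st.1 ++ [st.2], [b]))
    (x :: xs) (([] : List (List Int)), [x])
  simp only at hadj
  rw [hadj]
  have hp := portA_pairs g xs x [] []
  simp only [List.nil_append] at hp
  rw [List.tail_cons, hp]
  rw [pvChunks]

-- ===== VERDICT (by name: the statement is the Claim_ definition above) =====
theorem cluster_changes_spec : Claim_equal_cluster_changes := by
  intro changes max_gap _
  unfold Spec_cluster_changes cluster_changes cluster_changes_alt
  by_cases hemp : (PySem.Dict.ofList changes).items.isEmpty
  · rw [if_pos hemp]
    have hkeys : (PySem.Dict.ofList changes).keys = [] := by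
      simp [PySem.Dict.keys]
      simpa using hemp
    rw [hkeys]
    have hs : PySem.List.sorted ([] : List Int) (fun x => x) false = [] := by
      simp [PySem.List.sorted_eq_nil_iff]
    rw [hs]
    rw [pvOuter, if_neg (by simp [PySem.List.len])]
  · rw [if_neg hemp]
    obtain ⟨x, xs, hoff⟩ : ∃ x xs,
        PySem.List.sorted (PySem.Dict.ofList changes).keys (fun x => x) false = x :: xs := by
      cases hcd : PySem.List.sorted (PySem.Dict.ofList changes).keys (fun x => x) false with
      | nil =>
        exfalso
        rw [PySem.List.sorted_eq_nil_iff] at hcd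
        simp [PySem.Dict.keys] at hcd
        simp [hcd] at hemp
      | cons a b => exact ⟨a, b, rfl⟩
    rw [hoff]
    have hA := portA_core max_gap x xs
    simp only at hA
    rw [hA]
    have hB := pvOuter_eq max_gap (x :: xs) 0 [] (by simp)
    simp only [Nat.cast_zero, List.drop_zero, List.nil_append] at hB
    have hlen : PySem.List.len (x :: xs) = ((x :: xs).length : Int) := by
      simp [PySem.List.len]
    show pvChunks max_gap (x :: xs)
      = pvOuter max_gap (x :: xs) (PySem.List.len (x :: xs)) 0 []
    rw [hlen, hB]
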